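-- pv_equiv track=rewrite | github.com/demonicangel317/Python-sortation-algorithm | python sortation.py | radix_sort_string_word
-- ===== SOURCE A (Python) =====
-- def empty_array(space_allocate):
--     """
--     Returns a list containing n number of lists
--     Takes in the amount of space to allocate then returns a list of list depending on the value entered
--     :Input:
--         argv1:space_allocate amount of space to allocate to the list
--     :Output:
--         returns list containing n number of lists
--     Time Complexity:
--         Best: O(N) N = number of lists to append to list
--         Worst: O(N) N = number of lists to append to list
--     Space complexity:
--         AUX: O(N) N = Size of the list to be created
--         Input: O(1)
--     """
--     count_array = [None] * (space_allocate)
--     for i in range(len(count_array)):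
--         count_array[i] = []
--     return count_array
--
-- def radix_sort_string_word(myList, index, roster=27):
--     """
--     Sightly modified radix sort which is used to change the results list according to the order of the words.
--     This takes in an index to indicated which sublist element needs to be taken.
--     Input:
--         :param myList:The list that needs to be sorted
--         :param index: which index of the sublist must be taken
--         :param roster: the number of letters the team has been constructed in
--         :return: the sorted list
--
--     Time Complexity:
--         K = length of team string
--         M = roster size
--         N = Number of elements in results
--         O(KM + KN)
--         ~O(KM)
--         Best: O(KN)
--         Worst: O(KN)
--
--     Auxillary Space:
--         The creation of empty array take O(M) space M = roster size
--         Then we will append all the elements into this therefore an additional N space will be taken.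
--         therefore, the auxiliary space is,
--         =O(M + N) N = number of elements inside the array(myList)
--     Input Space:
--         =O(N) N = N = number of elements inside the array(myList)
--     Post Condition:
--         The list is sorted on based on the words in the specific index of the sublist
--     """
--
--     numColoums = len(myList[0][1])                                                                                      #O(1)
--     # creating the count array
--     count_array = empty_array(roster)                                                                                   #O(M) M = size of roster
--     # iterate through the main list
--     for column in range(-1, -(numColoums + 1), -1):                                                                     #O(K) M = length of team string
--         # chekcs if the coloumn length is greater than item length
--         for item in myList:                                                                                             #K*N =O(KN) N = length of list
--             listItem = item[index]
--             index2 = ord(listItem[column]) - 65                                                                         #K*N =O(KN)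
--             count_array[index2].append(item)                                                                            #K*N =O(KN)
--         # rearrange the semi sorted list back into the original list
--         rearrangeList(myList, count_array)                                                                              #K*(N + M)=O(KN + KM)
--         # reset count array
--         count_array = empty_array(roster)                                                                               #K*M = O(KM)
--     return myList
--
-- def rearrangeList(mainList, suppList):
--     """
--     This function is a part of radix sort. It takes in a supplementary list of lists
--     which contains the elements in the main list.
--     It then iterates through the supplementary list and replaces the elements of the mainlist
--     with a new ordering by the supplementary list while maintaining stability
--     :Input:
--         argv1:mainlist the list where the ordering is to be changed
--         argv2:suppList the list which contains the elements of the main list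
--     :Postcondition:
--         mainlist input has a new ordering of its elements
--     Time Complexity:
--         The outer loop will run M times and the inner loop will run a total of N times
--         Best: O(N + M) N = Length of mainList M = length of supplementary list
--         Worst: O(N + M) N = Length of mainList M = length of supplementary list
--     Space Complexity:
--         Aux : O(1)
--         Input : O(M + N) M = number of elements in mainList N = number of elements in supplementary list
--     PostCondition = the mainList will now have the supplementary list ordering
--
--     """
--     index = 0
--     for i in range(len(suppList)):
--         itemList = suppList[i]
--         if (len(itemList) == 0):
--             continue
--         else:
--             frequency = len(itemList)
--             for j in range(frequency):
--                 mainList[index] = itemList[j]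
--                 index += 1
-- ===== SOURCE B (Python) =====
-- def radix_sort_string_word(myList, index, roster=27):
--     """Counting-sort variant of A: per column it counts key frequencies,
--     turns them into starting offsets by a prefix sum, and scatters the items
--     forward into an output list, instead of maintaining 27 bucket lists.
--     Mutates myList in place (like A) and returns it."""
--     numColoums = len(myList[0][1])
--     n = len(myList)
--     for column in range(-1, -(numColoums + 1), -1):
--         # one pass: keys and frequencies
--         keys = []
--         counts = [0] * roster
--         for item in myList:
--             k = (ord(item[index][column]) - 65) % roster
--             keys.append(k)
--             counts[k] += 1
--         # prefix sums -> starting offset of each key's block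
--         offsets = [0] * roster
--         s = 0
--         for r in range(roster):
--             offsets[r] = s
--             s += counts[r]
--         # stable forward scatter
--         out = [None] * n
--         for item, k in zip(myList, keys):
--             out[offsets[k]] = item
--             offsets[k] += 1
--         myList[:] = out
--     return myList
-- ===== Notes on version B (the rewrite author's own statement) =====
-- stated objective: alternative
-- what changed: Per column, the 27 growing bucket lists plus the rearrangeList copy-back are replaced by classic counting sort: one pass records each item's key and a frequency table, a prefix-sum pass turns frequencies into block offsets, and a stable forward scatter places each item directly at its offset in the output list.
import Mathlib
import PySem

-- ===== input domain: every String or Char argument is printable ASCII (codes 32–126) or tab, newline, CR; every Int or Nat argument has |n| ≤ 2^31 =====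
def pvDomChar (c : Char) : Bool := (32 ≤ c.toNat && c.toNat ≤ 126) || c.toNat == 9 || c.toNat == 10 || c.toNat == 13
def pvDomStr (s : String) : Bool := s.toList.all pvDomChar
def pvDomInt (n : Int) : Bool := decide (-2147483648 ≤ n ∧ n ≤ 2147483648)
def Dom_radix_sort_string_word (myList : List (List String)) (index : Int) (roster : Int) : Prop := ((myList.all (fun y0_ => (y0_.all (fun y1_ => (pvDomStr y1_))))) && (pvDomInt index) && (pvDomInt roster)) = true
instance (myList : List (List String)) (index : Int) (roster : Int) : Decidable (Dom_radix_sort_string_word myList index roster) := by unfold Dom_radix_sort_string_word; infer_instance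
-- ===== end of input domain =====

-- B replaces A's 27 growing bucket lists + rearrangeList copy-back by classic counting sort
-- (count, prefix-sum offsets, stable forward scatter); same outer column loop, same return value;
-- both Pythons mutate myList in place, the equivalence proved here is about the return value.

-- ===== PORT A =====
-- shared key expression: ord(item[index][column]) - 65  (.getD defaults unreachable under Pre_)
def pvKey (index column : Int) (item : List String) : Int :=
  (((PySem.Str.pyGet? ((PySem.List.pyGet? item index).getD "") column).getD 'A').toNat : Int) - 65

-- empty_array: [None]*n, then every slot set to []  (negative n gives [])
def empty_array (space_allocate : Int) : List (List (List String)) :=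
  List.replicate space_allocate.toNat []

-- rearrangeList: sequential overwrite mainList[index] = itemList[j]; the running write
-- index is a Nat (it starts at 0 and only increases, exactly as in Python)
def rearrangeList (mainList : List (List String)) (suppList : List (List (List String))) : List (List String) :=
  (suppList.foldl
    (fun (st : List (List String) × Nat) itemList =>
      if itemList.length == 0 then st
      else itemList.foldl (fun st2 x => (st2.1.set st2.2 x, st2.2 + 1)) st)
    (mainList, 0)).1

-- one column pass of A: scatter into count_array buckets (Python index wrap via pySetD/pyGetD;
-- out-of-range raises are excluded by Pre_), then rearrange back
def radixPassA (index roster column : Int) (cur : List (List String)) : List (List String) :=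
  let count_array := cur.foldl
    (fun ca item =>
      let index2 := pvKey index column item
      PySem.List.pySetD ca index2 (PySem.List.pyGetD ca index2 [] ++ [item]))
    (empty_array roster)
  rearrangeList cur count_array

def radix_sort_string_word (myList : List (List String)) (index : Int) (roster : Int) : List (List String) :=
  let numColoums := PySem.Str.len ((PySem.List.pyGet? ((PySem.List.pyGet? myList 0).getD []) 1).getD "")
  (PySem.List.pyRange (-1) (-(numColoums + 1)) (-1)).foldl
    (fun cur column => radixPassA index roster column cur) myList

-- ===== PORT B =====
-- one column pass of B (counting sort): one loop records keys and counts, a prefix-sum loop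
-- turns counts into offsets, a forward scatter places each item at its offset.
-- Python's out = [None]*n is ported as replicate n [] (every slot is overwritten under Pre_).
def radixPassB (index roster column : Int) (n : Nat) (cur : List (List String)) : List (List String) :=
  let kc := cur.foldl
    (fun (st : List Int × List Int) item =>
      let k := PySem.Int.mod (pvKey index column item) roster
      (st.1 ++ [k], PySem.List.pySetD st.2 k (PySem.List.pyGetD st.2 k 0 + 1)))
    ([], List.replicate roster.toNat 0)
  let offsets0 := ((PySem.List.pyRange 0 roster 1).foldl
    (fun (st : List Int × Int) r =>
      (PySem.List.pySetD st.1 r st.2, st.2 + PySem.List.pyGetD kc.2 r 0))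
    (List.replicate roster.toNat 0, 0)).1
  ((cur.zip kc.1).foldl
    (fun (st : List (List String) × List Int) p =>
      (PySem.List.pySetD st.1 (PySem.List.pyGetD st.2 p.2 0) p.1,
       PySem.List.pySetD st.2 p.2 (PySem.List.pyGetD st.2 p.2 0 + 1)))
    (List.replicate n ([] : List String), offsets0)).1

def radix_sort_string_word_alt (myList : List (List String)) (index : Int) (roster : Int) : List (List String) :=
  let numColoums := PySem.Str.len ((PySem.List.pyGet? ((PySem.List.pyGet? myList 0).getD []) 1).getD "")
  let n := myList.length
  (PySem.List.pyRange (-1) (-(numColoums + 1)) (-1)).foldl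
    (fun cur column => radixPassB index roster column n cur) myList

-- ===== PRECONDITION & SPEC =====
-- the character Python reads for column -(c+1): s[len(s)-1-c]
def pvColChar (s : List Char) (c : Nat) : Char := (s[s.length - 1 - c]?).getD 'A'

-- Pre_ = exactly the inputs where A returns (no exception): myList nonempty, its first row has a
-- second entry, and (unless that entry is empty) every row has a valid item[index] whose string is
-- long enough for every column and whose last K characters give a bucket index inside [-roster, roster).
def Pre_radix_sort_string_word (myList : List (List String)) (index : Int) (roster : Int) : Prop :=
  myList ≠ [] ∧ 1 < myList.headI.length ∧
  ((myList.headI.getD 1 "").toList.length = 0 ∨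
    ∀ item ∈ myList,
      (-(item.length : Int) ≤ index ∧ index < (item.length : Int)) ∧
      (myList.headI.getD 1 "").toList.length ≤ ((PySem.List.pyGet? item index).getD "").toList.length ∧
      ∀ c ∈ List.range (myList.headI.getD 1 "").toList.length,
        -roster ≤ ((pvColChar ((PySem.List.pyGet? item index).getD "").toList c).toNat : Int) - 65 ∧
        ((pvColChar ((PySem.List.pyGet? item index).getD "").toList c).toNat : Int) - 65 < roster)

instance (myList : List (List String)) (index : Int) (roster : Int) : Decidable (Pre_radix_sort_string_word myList index roster) := by
  unfold Pre_radix_sort_string_word; infer_instance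

def pvWitness_radix_sort_string_word : List (List String) × Int × Int :=
  ([["BA", "BA"], ["AB", "AB"]], 0, 27)

def Spec_radix_sort_string_word (myList : List (List String)) (index : Int) (roster : Int) (out : List (List String)) : Prop := out = radix_sort_string_word_alt myList index roster
instance (myList : List (List String)) (index : Int) (roster : Int) (out : List (List String)) : Decidable (Spec_radix_sort_string_word myList index roster out) := by unfold Spec_radix_sort_string_word; infer_instance

-- ===== CLAIM (what is proved, stated in full; the proofs are below) =====
def Claim_equal_radix_sort_string_word : Prop := ∀ (myList : List (List String)) (index : Int) (roster : Int), Dom_radix_sort_string_word myList index roster → Pre_radix_sort_string_word myList index roster → Spec_radix_sort_string_word myList index roster (radix_sort_string_word myList index roster)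

-- ===== LEMMAS AND PROOFS =====\n
lemma pvEmod_neg (roster i : Int) (hr : 0 < roster) (h1 : -roster ≤ i) (hi : i < 0) :
    i % roster = i + roster := by
  have h := Int.add_mul_emod_self_left (a := i) (b := roster) (c := 1)
  rw [mul_one] at h
  rw [← h, Int.emod_eq_of_lt (by omega) (by omega)]

lemma pvIdx_wrap (roster i : Int) (hr : 0 < roster) (h1 : -roster ≤ i) (h2 : i < roster) :
    PySem.List.pyIdx? roster.toNat i = some (PySem.Int.mod i roster).toNat := by
  rw [PySem.Int.mod_eq_emod_of_pos hr]
  unfold PySem.List.pyIdx?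
  split_ifs with ha hb hc <;> [skip; omega; skip; omega]
  · rw [Int.emod_eq_of_lt ha (by omega)]
  · rw [pvEmod_neg roster i hr h1 (by omega)]
    congr 1
    omega

lemma pvGetD_wrap {α : Type} (xs : List α) (roster i : Int) (d : α)
    (hlen : xs.length = roster.toNat) (hr : 0 < roster) (h1 : -roster ≤ i) (h2 : i < roster) :
    PySem.List.pyGetD xs i d = xs.getD (PySem.Int.mod i roster).toNat d := by
  simp [PySem.List.pyGetD, PySem.List.pyGet?, hlen, pvIdx_wrap roster i hr h1 h2, List.getD]

lemma pvSetD_wrap {α : Type} (xs : List α) (roster i : Int) (v : α)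
    (hlen : xs.length = roster.toNat) (hr : 0 < roster) (h1 : -roster ≤ i) (h2 : i < roster) :
    PySem.List.pySetD xs i v = xs.set (PySem.Int.mod i roster).toNat v := by
  simp [PySem.List.pySetD, PySem.List.pySet?, hlen, pvIdx_wrap roster i hr h1 h2]

lemma pvGetD_nonneg {α : Type} (xs : List α) (i : Int) (d : α) (h1 : 0 ≤ i) (h2 : i < xs.length) :
    PySem.List.pyGetD xs i d = xs.getD i.toNat d := by
  simp [PySem.List.pyGetD, PySem.List.pyGet?, PySem.List.pyIdx?, h1, h2, List.getD]

lemma pvSetD_nonneg {α : Type} (xs : List α) (i : Int) (v : α) (h1 : 0 ≤ i) (h2 : i < xs.length) :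
    PySem.List.pySetD xs i v = xs.set i.toNat v := by
  simp [PySem.List.pySetD, PySem.List.pySet?, PySem.List.pyIdx?, h1, h2]

lemma pvSet_map_range {β : Type} (g : Nat → β) (n j : Nat) (v : β) (hj : j < n) :
    ((List.range n).map g).set j v = (List.range n).map (fun r => if r = j then v else g r) := by
  apply List.ext_getElem
  · simp
  · intro i h1 h2
    simp at h1
    rw [List.getElem_set]
    simp only [List.getElem_map, List.getElem_range]
    by_cases hij : j = i
    · simp [hij]
    · rw [if_neg (Ne.symm hij), if_neg hij]

def pvIdxN {α : Type} (f : α → Int) (roster : Int) (x : α) : Nat :=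
  (PySem.Int.mod (f x) roster).toNat

lemma pvIdxN_lt {α : Type} (f : α → Int) (roster : Int) (x : α) (hr : 0 < roster) :
    pvIdxN f roster x < roster.toNat := by
  have h1 := PySem.Int.mod_nonneg (a := f x) hr
  have h2 := PySem.Int.mod_lt (a := f x) hr
  unfold pvIdxN; omega

lemma pvMod_idem (roster i : Int) (hr : 0 < roster) :
    PySem.Int.mod (PySem.Int.mod i roster) roster = PySem.Int.mod i roster := by
  have h1 := PySem.Int.mod_nonneg (a := i) hr
  have h2 := PySem.Int.mod_lt (a := i) hr
  rw [PySem.Int.mod_eq_emod_of_pos hr, Int.emod_eq_of_lt h1 h2]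

lemma pvBucketFoldA {α : Type} (f : α → Int) (roster : Int) (hr : 0 < roster) :
    ∀ (l : List α) (g : Nat → List α), (∀ x ∈ l, -roster ≤ f x ∧ f x < roster) →
      l.foldl (fun ca x => PySem.List.pySetD ca (f x) (PySem.List.pyGetD ca (f x) [] ++ [x]))
        ((List.range roster.toNat).map g)
      = (List.range roster.toNat).map (fun r => g r ++ l.filter (fun x => pvIdxN f roster x == r)) := by
  intro l
  induction l with
  | nil => intro g _; simp
  | cons x l ih =>
    intro g hb
    obtain ⟨hx, hl⟩ := List.forall_mem_cons.mp hb
    have hlen : ((List.range roster.toNat).map g).length = roster.toNat := by simp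
    simp only [List.foldl_cons]
    rw [pvGetD_wrap _ roster _ _ hlen hr hx.1 hx.2,
        pvSetD_wrap _ roster _ _ hlen hr hx.1 hx.2]
    simp only [show (PySem.Int.mod (f x) roster).toNat = pvIdxN f roster x from rfl]
    rw [PySem.List.getD_map_range _ _ _ _ (pvIdxN_lt f roster x hr),
        pvSet_map_range _ _ _ _ (pvIdxN_lt f roster x hr),
        ih _ hl]
    apply List.map_congr_left
    intro r _
    by_cases hc : pvIdxN f roster x = r
    · simp [List.filter_cons, hc]
    · have : (pvIdxN f roster x == r) = false := by simp [hc]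
      simp [List.filter_cons, this, if_neg (Ne.symm hc)]

lemma pvCountFoldB {α : Type} (f : α → Int) (roster : Int) (hr : 0 < roster) :
    ∀ (l : List α) (g : Nat → Int), (∀ x ∈ l, -roster ≤ f x ∧ f x < roster) →
      l.foldl (fun t x => PySem.List.pySetD t (PySem.Int.mod (f x) roster)
                 (PySem.List.pyGetD t (PySem.Int.mod (f x) roster) 0 + 1))
        ((List.range roster.toNat).map g)
      = (List.range roster.toNat).map
          (fun r => g r + ((l.filter (fun x => pvIdxN f roster x == r)).length : Int)) := by
  intro l
  induction l with
  | nil => intro g _; simp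
  | cons x l ih =>
    intro g hb
    obtain ⟨hx, hl⟩ := List.forall_mem_cons.mp hb
    have hm1 := PySem.Int.mod_nonneg (a := f x) hr
    have hm2 := PySem.Int.mod_lt (a := f x) hr
    have hlen : ((List.range roster.toNat).map g).length = roster.toNat := by simp
    have hIdx : (PySem.Int.mod (PySem.Int.mod (f x) roster) roster).toNat = pvIdxN f roster x := by
      rw [pvMod_idem roster (f x) hr]; rfl
    simp only [List.foldl_cons]
    rw [pvGetD_wrap _ roster _ _ hlen hr (by omega) hm2,
        pvSetD_wrap _ roster _ _ hlen hr (by omega) hm2]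
    simp only [hIdx]
    rw [PySem.List.getD_map_range _ _ _ _ (pvIdxN_lt f roster x hr),
        pvSet_map_range _ _ _ _ (pvIdxN_lt f roster x hr),
        ih _ hl]
    apply List.map_congr_left
    intro r _
    by_cases hc : pvIdxN f roster x = r
    · simp [List.filter_cons, hc]; omega
    · have : (pvIdxN f roster x == r) = false := by simp [hc]
      simp [List.filter_cons, this, if_neg (Ne.symm hc)]

def pvCnt {α : Type} (f : α → Int) (roster : Int) (l : List α) (r : Nat) : Nat :=
  (l.filter (fun x => pvIdxN f roster x == r)).length

def pvBase {α : Type} (f : α → Int) (roster : Int) (l : List α) (m : Nat) : Nat :=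
  ((List.range m).map (pvCnt f roster l)).sum

lemma pvCnt_append {α : Type} (f : α → Int) (roster : Int) (l1 l2 : List α) (r : Nat) :
    pvCnt f roster (l1 ++ l2) r = pvCnt f roster l1 r + pvCnt f roster l2 r := by
  simp [pvCnt]

lemma pvBase_succ {α : Type} (f : α → Int) (roster : Int) (l : List α) (m : Nat) :
    pvBase f roster l (m + 1) = pvBase f roster l m + pvCnt f roster l m := by
  simp [pvBase, List.range_succ]

lemma pvBase_le {α : Type} (f : α → Int) (roster : Int) (l : List α) (m1 m2 : Nat) (h : m1 ≤ m2) :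
    pvBase f roster l m1 ≤ pvBase f roster l m2 := by
  induction m2, h using Nat.le_induction with
  | base => omega
  | succ k hk ih => rw [pvBase_succ]; omega

lemma pvSumIte (e n : Nat) (he : e < n) :
    ((List.range n).map (fun r => if e = r then 1 else 0)).sum = 1 := by
  induction n with
  | zero => omega
  | succ k ih =>
    rw [List.range_succ]
    rcases Nat.lt_or_ge e k with hlt | hge
    · simp [ih hlt]; omega
    · have he' : e = k := by omega
      subst he'
      have hz : ((List.range e).map (fun r => if e = r then 1 else 0)).sum = 0 := by
        apply List.sum_eq_zero
        intro y hy
        simp only [List.mem_map, List.mem_range] at hy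
        obtain ⟨r, hr, hy'⟩ := hy
        rw [if_neg (by omega)] at hy'
        omega
      simp [hz]

lemma pvTotal {α : Type} (f : α → Int) (roster : Int) (n : Nat)
    (l : List α) (h : ∀ x ∈ l, pvIdxN f roster x < n) :
    pvBase f roster l n = l.length := by
  induction l with
  | nil =>
    simp only [pvBase, List.length_nil]
    apply List.sum_eq_zero
    intro y hy
    simp only [List.mem_map] at hy
    obtain ⟨r, _, hy'⟩ := hy
    simp [pvCnt] at hy'
    omega
  | cons x l ih =>
    obtain ⟨hx, hl⟩ := List.forall_mem_cons.mp h
    unfold pvBase at *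
    have hcnt : ∀ r : Nat, pvCnt f roster (x :: l) r
        = pvCnt f roster l r + (if pvIdxN f roster x = r then 1 else 0) := by
      intro r
      by_cases hc : pvIdxN f roster x = r
      · simp [pvCnt, List.filter_cons, hc]
      · have : (pvIdxN f roster x == r) = false := by simp [hc]
        simp [pvCnt, List.filter_cons, this, hc]
    rw [List.map_congr_left (fun r _ => hcnt r), List.sum_map_add, ih hl,
        pvSumIte (pvIdxN f roster x) n hx]
    simp

lemma pvOffsetsFold {α : Type} (f : α → Int) (roster : Int) (hr : 0 < roster) (l : List α) :
    ∀ (m : Nat), m ≤ roster.toNat →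
      (List.map (fun (j : Nat) => (j : Int)) (List.range m)).foldl
        (fun (st : List Int × Int) r =>
          (PySem.List.pySetD st.1 r st.2,
           st.2 + PySem.List.pyGetD ((List.range roster.toNat).map
             (fun q => (pvCnt f roster l q : Int))) r 0))
        ((List.range roster.toNat).map (fun _ => (0 : Int)), 0)
      = ((List.range roster.toNat).map
           (fun r => if r < m then (pvBase f roster l r : Int) else 0),
         (pvBase f roster l m : Int)) := by
  intro m
  induction m with
  | zero => intro _; simp [pvBase]
  | succ k ih =>
    intro hk
    rw [List.range_succ]
    simp only [List.map_append, List.map_cons, List.map_nil, List.foldl_append,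
      List.foldl_cons, List.foldl_nil]
    rw [ih (by omega)]
    have hlen : (((List.range roster.toNat).map
        (fun r => if r < k then (pvBase f roster l r : Int) else 0))).length = roster.toNat := by
      simp
    rw [pvSetD_nonneg _ _ _ (by omega) (by rw [hlen]; exact_mod_cast (by omega : (k:Int) < roster.toNat)),
        pvGetD_nonneg _ _ _ (by omega) (by simp; omega)]
    simp only [Int.toNat_natCast]
    rw [pvSet_map_range _ _ _ _ (by omega),
        PySem.List.getD_map_range _ _ _ _ (by omega)]
    rw [Prod.mk.injEq]
    constructor
    · apply List.map_congr_left
      intro r hrm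
      simp only [List.mem_range] at hrm
      by_cases hc : r = k
      · simp [hc]
      · simp only [if_neg hc]
        by_cases h2 : r < k
        · rw [if_pos h2, if_pos (by omega)]
        · rw [if_neg h2, if_neg (by omega)]
    · rw [pvBase_succ]
      push_cast
      ring

lemma pvSet_flatten_at {β : Type} :
    ∀ (ss : List (List β)) (k j : Nat) (v : β), k < ss.length → j < (ss.getD k []).length →
      ss.flatten.set ((ss.take k).flatten.length + j) v
        = (ss.set k ((ss.getD k []).set j v)).flatten := by
  intro ss
  induction ss with
  | nil => intro k j v hk; simp at hk
  | cons s t ih =>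
    intro k j v hk hj
    cases k with
    | zero =>
      simp only [List.take_zero, List.flatten_nil, List.length_nil, Nat.zero_add,
        List.getD_cons_zero] at *
      simp only [List.flatten_cons, List.set_cons_zero]
      rw [List.set_append_left _ _ hj]
    | succ k =>
      simp only [List.getD_cons_succ] at hj
      simp only [List.length_cons, Nat.add_lt_add_iff_right] at hk
      simp only [List.take_succ_cons, List.flatten_cons, List.length_append,
        List.set_cons_succ]
      rw [Nat.add_assoc, List.set_append_right _ _ (by omega), Nat.add_sub_cancel_left,
        ih k j v hk hj]
      simp [List.getD_cons_succ]

-- length of a P-segment is the full count of its key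
def pvSeg {α : Type} (f : α → Int) (roster : Int) (full P : List α) (d : α) (r : Nat) : List α :=
  P.filter (fun x => pvIdxN f roster x == r) ++
    List.replicate (pvCnt f roster full r - pvCnt f roster P r) d

lemma pvSeg_length {α : Type} (f : α → Int) (roster : Int) (full P S : List α) (d : α)
    (hPS : full = P ++ S) (r : Nat) :
    (pvSeg f roster full P d r).length = pvCnt f roster full r := by
  have h : pvCnt f roster P r ≤ pvCnt f roster full r := by
    rw [hPS, pvCnt_append]; omega
  simp [pvSeg, pvCnt] at *
  omega

lemma pvOut_length {α : Type} (f : α → Int) (roster : Int) (full P S : List α) (d : α)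
    (hPS : full = P ++ S) :
    ((List.range roster.toNat).map (pvSeg f roster full P d)).flatten.length
      = pvBase f roster full roster.toNat := by
  rw [List.length_flatten, List.map_map, pvBase]
  congr 1
  apply List.map_congr_left
  intro r _
  exact pvSeg_length f roster full P S d hPS r

lemma pvScatterFold {α : Type} (f : α → Int) (roster : Int) (hr : 0 < roster)
    (full : List α) (d : α) (hk : ∀ x ∈ full, -roster ≤ f x ∧ f x < roster) :
    ∀ (S P : List α), full = P ++ S →
      S.foldl (fun (st : List α × List Int) x =>
          (PySem.List.pySetD st.1 (PySem.List.pyGetD st.2 (PySem.Int.mod (f x) roster) 0) x,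
           PySem.List.pySetD st.2 (PySem.Int.mod (f x) roster)
             (PySem.List.pyGetD st.2 (PySem.Int.mod (f x) roster) 0 + 1)))
        (((List.range roster.toNat).map (pvSeg f roster full P d)).flatten,
         (List.range roster.toNat).map
           (fun r => ((pvBase f roster full r + pvCnt f roster P r : Nat) : Int)))
      = (((List.range roster.toNat).map (pvSeg f roster full full d)).flatten,
         (List.range roster.toNat).map
           (fun r => ((pvBase f roster full r + pvCnt f roster full r : Nat) : Int))) := by
  intro S
  induction S with
  | nil =>
    intro P hPS
    rw [List.append_nil] at hPS
    subst hPS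
    rfl
  | cons x S' ih =>
    intro P hPS
    have hx : x ∈ full := by rw [hPS]; simp
    obtain ⟨hb1, hb2⟩ := hk x hx
    have hm1 := PySem.Int.mod_nonneg (a := f x) hr
    have hm2 := PySem.Int.mod_lt (a := f x) hr
    have he : (PySem.Int.mod (f x) roster).toNat = pvIdxN f roster x := rfl
    have hen : pvIdxN f roster x < roster.toNat := pvIdxN_lt f roster x hr
    set e := pvIdxN f roster x with hedef
    have hofflen : ((List.range roster.toNat).map
        (fun r => ((pvBase f roster full r + pvCnt f roster P r : Nat) : Int))).length
        = roster.toNat := by simp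
    -- count facts
    have hcntP : pvCnt f roster P e < pvCnt f roster full e := by
      have : pvCnt f roster (x :: S') e ≥ 1 := by
        have : (pvIdxN f roster x == e) = true := by simp [hedef]
        simp [pvCnt, List.filter_cons, this]
      rw [hPS, pvCnt_append]
      omega
    simp only [List.foldl_cons]
    -- offsets read
    rw [pvGetD_wrap _ roster _ _ hofflen hr (by omega) hm2, pvMod_idem roster _ hr]
    simp only [he]
    rw [PySem.List.getD_map_range _ _ _ _ hen]
    -- out write
    have houtlen : ((List.range roster.toNat).map (pvSeg f roster full P d)).flatten.length
        = pvBase f roster full roster.toNat :=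
      pvOut_length f roster full P (x :: S') d hPS
    have hposlt : pvBase f roster full e + pvCnt f roster P e
        < pvBase f roster full roster.toNat := by
      have h1 := pvBase_succ f roster full e
      have h2 := pvBase_le f roster full (e + 1) roster.toNat (by omega)
      omega
    rw [pvSetD_nonneg _ _ _ (by positivity) (by rw [houtlen]; exact_mod_cast hposlt)]
    simp only [Int.toNat_natCast]
    -- offsets write
    rw [pvSetD_wrap _ roster _ _ hofflen hr (by omega) hm2, pvMod_idem roster _ hr]
    simp only [he]
    rw [pvSet_map_range _ _ _ _ hen]
    -- rewrite the out update as the P ++ [x] state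
    have hgetD : ((List.range roster.toNat).map (pvSeg f roster full P d)).getD e []
        = pvSeg f roster full P d e := PySem.List.getD_map_range _ _ _ _ hen
    have htake : (((List.range roster.toNat).map (pvSeg f roster full P d)).take e).flatten.length
        = pvBase f roster full e := by
      rw [← List.map_take, List.take_range, Nat.min_eq_left (by omega)]
      rw [List.length_flatten, List.map_map, pvBase]
      congr 1
      apply List.map_congr_left
      intro r hrmem
      exact pvSeg_length f roster full P (x :: S') d hPS r
    have hjlt : pvCnt f roster P e < (pvSeg f roster full P d e).length := by
      rw [pvSeg_length f roster full P (x :: S') d hPS e]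
      exact hcntP
    have hset := pvSet_flatten_at ((List.range roster.toNat).map (pvSeg f roster full P d))
      e (pvCnt f roster P e) x (by simp; omega) (by rw [hgetD]; exact hjlt)
    rw [htake, hgetD] at hset
    rw [hset]
    -- the updated segment array is the P ++ [x] segment array
    have hsegset : ((List.range roster.toNat).map (pvSeg f roster full P d)).set e
        ((pvSeg f roster full P d e).set (pvCnt f roster P e) x)
        = (List.range roster.toNat).map (pvSeg f roster full (P ++ [x]) d) := by
      rw [pvSet_map_range _ _ _ _ hen]
      apply List.map_congr_left
      intro r hrmem
      by_cases hc : r = e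
      · rw [hc, if_pos rfl]
        -- (filterP ++ replicate m d).set (cnt P e) x = filterP ++ [x] ++ replicate (m-1) d
        have hflen : (P.filter (fun y => pvIdxN f roster y == e)).length = pvCnt f roster P e := rfl
        have hbeq : (pvIdxN f roster x == e) = true := by simp [hedef]
        have hone : pvCnt f roster [x] e = 1 := by simp [pvCnt, hbeq]
        have hm : pvCnt f roster full e - pvCnt f roster P e
            = (pvCnt f roster full e - pvCnt f roster (P ++ [x]) e) + 1 := by
          rw [pvCnt_append, hone]
          omega
        simp only [pvSeg]
        rw [List.set_append_right _ _ (by omega), hflen, Nat.sub_self, hm,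
          List.replicate_succ, List.set_cons_zero]
        have hfx : (P ++ [x]).filter (fun y => pvIdxN f roster y == e)
            = P.filter (fun y => pvIdxN f roster y == e) ++ [x] := by
          simp [List.filter_append, hbeq]
        rw [hfx]
        simp
      · rw [if_neg hc]
        have hbeq : (pvIdxN f roster x == r) = false := by rw [← hedef]; simp; omega
        have hzero : pvCnt f roster [x] r = 0 := by simp [pvCnt, hbeq]
        simp [pvSeg, pvCnt_append, hzero, List.filter_append, hbeq]
    rw [hsegset]
    -- the updated offsets are the P ++ [x] offsets
    have hoffset : ((List.range roster.toNat).map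
        (fun r => if r = e then ((pvBase f roster full e + pvCnt f roster P e : Nat) : Int) + 1
          else ((pvBase f roster full r + pvCnt f roster P r : Nat) : Int)))
        = (List.range roster.toNat).map
            (fun r => ((pvBase f roster full r + pvCnt f roster (P ++ [x]) r : Nat) : Int)) := by
      apply List.map_congr_left
      intro r hrmem
      by_cases hc : r = e
      · rw [hc, if_pos rfl, pvCnt_append]
        have hbeq : (pvIdxN f roster x == e) = true := by simp [hedef]
        have hone : pvCnt f roster [x] e = 1 := by simp [pvCnt, hbeq]
        rw [hone]
        push_cast
        ring
      · rw [if_neg hc, pvCnt_append]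
        have hbeq : (pvIdxN f roster x == r) = false := by rw [← hedef]; simp; omega
        have hzero : pvCnt f roster [x] r = 0 := by simp [pvCnt, hbeq]
        rw [hzero]
        simp
    rw [hoffset]
    exact ih (P ++ [x]) (by rw [hPS]; simp)


lemma pvWriteFold {β : Type} :
    ∀ (ws : List β) (m : List β) (i : Nat), i + ws.length = m.length →
      (ws.foldl (fun (st : List β × Nat) x => (st.1.set st.2 x, st.2 + 1)) (m, i)).1
        = m.take i ++ ws := by
  intro ws
  induction ws with
  | nil =>
    intro m i h
    simp only [List.length_nil, Nat.add_zero] at h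
    simp [List.take_of_length_le (le_of_eq h.symm)]
  | cons x t ih =>
    intro m i h
    simp only [List.foldl_cons, List.length_cons] at *
    rw [ih (m.set i x) (i + 1) (by simp; omega)]
    have hi : i < m.length := by omega
    rw [List.take_set, List.take_add_one, List.getElem?_eq_getElem hi]
    simp only [Option.toList_some]
    rw [List.set_append_right _ _ (by simp only [List.length_take]; omega)]
    simp [List.length_take, Nat.min_eq_left (le_of_lt hi)]

lemma pvRearrangeSteps :
    ∀ (supp : List (List (List String))) (st : List (List String) × Nat),
      supp.foldl
        (fun (st : List (List String) × Nat) itemList =>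
          if itemList.length == 0 then st
          else itemList.foldl (fun st2 x => (st2.1.set st2.2 x, st2.2 + 1)) st)
        st
      = supp.flatten.foldl (fun (st2 : List (List String) × Nat) x => (st2.1.set st2.2 x, st2.2 + 1)) st := by
  intro supp
  induction supp with
  | nil => intro st; rfl
  | cons l t ih =>
    intro st
    simp only [List.foldl_cons, List.flatten_cons, List.foldl_append]
    by_cases hl : (l.length == 0) = true
    · have hnil : l = [] := by simpa using hl
      subst hnil
      rw [if_pos hl]
      simpa using ih st
    · rw [if_neg hl]
      exact ih _

lemma pvRearrangeFlatten (main : List (List String)) (supp : List (List (List String)))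
    (h : supp.flatten.length = main.length) :
    rearrangeList main supp = supp.flatten := by
  unfold rearrangeList
  rw [pvRearrangeSteps supp (main, 0), pvWriteFold supp.flatten main 0 (by omega)]
  simp
-- ===== glue: one column pass of each port equals the stable bucket arrangement =====

lemma pvMLen (index roster column : Int) (hr : 0 < roster) (cur : List (List String)) :
    ((List.range roster.toNat).map
      (fun r => cur.filter (fun x => pvIdxN (pvKey index column) roster x == r))).flatten.length
    = cur.length := by
  rw [List.length_flatten, List.map_map]
  have h1 : (List.length ∘ fun r => cur.filter (fun x => pvIdxN (pvKey index column) roster x == r))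
      = pvCnt (pvKey index column) roster cur := rfl
  rw [h1]
  exact pvTotal (pvKey index column) roster roster.toNat cur
    (fun x _ => pvIdxN_lt (pvKey index column) roster x hr)

lemma pvMMem (index roster column : Int) (cur : List (List String)) (y : List String)
    (hy : y ∈ ((List.range roster.toNat).map
      (fun r => cur.filter (fun x => pvIdxN (pvKey index column) roster x == r))).flatten) :
    y ∈ cur := by
  simp only [List.mem_flatten, List.mem_map] at hy
  obtain ⟨l, ⟨r, _, hl⟩, hyl⟩ := hy
  subst hl
  exact (List.mem_filter.mp hyl).1

lemma pvPassA_eq (index roster column : Int) (hr : 0 < roster) (cur : List (List String))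
    (hb : ∀ x ∈ cur, -roster ≤ pvKey index column x ∧ pvKey index column x < roster) :
    radixPassA index roster column cur
    = ((List.range roster.toNat).map
        (fun r => cur.filter (fun x => pvIdxN (pvKey index column) roster x == r))).flatten := by
  unfold radixPassA
  have hempty : empty_array roster
      = (List.range roster.toNat).map (fun _ => ([] : List (List String))) := by
    simp [empty_array, List.map_const']
  rw [hempty, pvBucketFoldA (pvKey index column) roster hr cur _ hb]
  simp only [List.nil_append]
  exact pvRearrangeFlatten cur _ (pvMLen index roster column hr cur)

lemma pvPassB_eq (index roster column : Int) (hr : 0 < roster) (cur : List (List String))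
    (hb : ∀ x ∈ cur, -roster ≤ pvKey index column x ∧ pvKey index column x < roster) :
    radixPassB index roster column cur.length cur
    = ((List.range roster.toNat).map
        (fun r => cur.filter (fun x => pvIdxN (pvKey index column) roster x == r))).flatten := by
  have hrep : ∀ (c : Int), List.replicate roster.toNat c
      = (List.range roster.toNat).map (fun _ => c) := by
    intro c; simp [List.map_const']
  unfold radixPassB
  simp only []
  rw [PySem.List.foldl_prod_mk
        (fun a item => a ++ [PySem.Int.mod (pvKey index column item) roster])
        (fun b item => PySem.List.pySetD b (PySem.Int.mod (pvKey index column item) roster)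
          (PySem.List.pyGetD b (PySem.Int.mod (pvKey index column item) roster) 0 + 1))
        cur [] (List.replicate roster.toNat 0),
      PySem.List.foldl_append_singleton_eq_map, List.nil_append,
      hrep (0 : Int), pvCountFoldB (pvKey index column) roster hr cur _ hb]
  have hcnt : (fun r => (0 : Int) + ((cur.filter
        (fun x => pvIdxN (pvKey index column) roster x == r)).length : Int))
      = (fun q => (pvCnt (pvKey index column) roster cur q : Int)) := by
    funext r; simp [pvCnt]
  rw [hcnt]
  have hpr : PySem.List.pyRange 0 roster 1
      = List.map (fun (j : Nat) => (j : Int)) (List.range roster.toNat) := by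
    conv_lhs => rw [show roster = ((roster.toNat : Nat) : Int) from by omega]
    exact PySem.List.pyRange_zero_nat roster.toNat
  rw [hpr, pvOffsetsFold (pvKey index column) roster hr cur roster.toNat le_rfl]
  simp only []
  have hoff0 : ((List.range roster.toNat).map
      (fun r => if r < roster.toNat then (pvBase (pvKey index column) roster cur r : Int) else 0))
      = (List.range roster.toNat).map
          (fun r => ((pvBase (pvKey index column) roster cur r
            + pvCnt (pvKey index column) roster ([] : List (List String)) r : Nat) : Int)) := by
    apply List.map_congr_left
    intro r hrm
    simp only [List.mem_range] at hrm
    rw [if_pos hrm]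
    have h0 : pvCnt (pvKey index column) roster ([] : List (List String)) r = 0 := rfl
    rw [h0, Nat.add_zero]
  rw [hoff0]
  have hzip : cur.zip (cur.map (fun x => PySem.Int.mod (pvKey index column x) roster))
      = cur.map (fun x => (x, PySem.Int.mod (pvKey index column x) roster)) := by
    have h := @List.zip_map' _ _ _ id (fun x => PySem.Int.mod (pvKey index column x) roster) cur
    simpa using h
  rw [hzip, List.foldl_map]
  have hout0 : List.replicate cur.length ([] : List String)
      = ((List.range roster.toNat).map
          (pvSeg (pvKey index column) roster cur ([] : List (List String)) ([] : List String))).flatten := by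
    symm
    rw [List.eq_replicate_iff]
    constructor
    · rw [pvOut_length (pvKey index column) roster cur [] cur ([] : List String) rfl]
      exact pvTotal (pvKey index column) roster roster.toNat cur
        (fun x _ => pvIdxN_lt (pvKey index column) roster x hr)
    · intro b hb'
      simp only [List.mem_flatten, List.mem_map] at hb'
      obtain ⟨l, ⟨r, _, hl⟩, hbl⟩ := hb'
      subst hl
      simp only [pvSeg, List.filter_nil, List.nil_append] at hbl
      exact (List.eq_of_mem_replicate hbl)
  rw [hout0]
  have hsc := pvScatterFold (pvKey index column) roster hr cur ([] : List String) hb cur [] rfl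
  rw [hsc]
  simp only []
  congr 1
  apply List.map_congr_left
  intro r _
  simp [pvSeg, Nat.sub_self]

lemma pvRangeNeg (K : Nat) :
    PySem.List.pyRange (-1) (-((K : Int) + 1)) (-1)
    = List.map (fun (c : Nat) => (-1 : Int) - (c : Int)) (List.range K) := by
  unfold PySem.List.pyRange
  rw [if_neg (by norm_num), if_neg (by norm_num : ¬ (0 : Int) < -1)]
  have hcount : (if -((K : Int) + 1) < -1 then
      (((-1 : Int) - -((K : Int) + 1) + -(-1) - 1) / -(-1)).toNat else 0) = K := by
    by_cases hK : 0 < K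
    · rw [if_pos (by push_cast; omega)]
      norm_num
    · have : K = 0 := by omega
      subst this
      norm_num
  rw [hcount]
  simp only []
  apply List.map_congr_left
  intro c _
  ring

lemma pvOuter (myList : List (List String)) (index roster : Int)
    (hne : myList ≠ []) :
    ∀ (cols : List Int),
      (∀ col ∈ cols, ∀ x ∈ myList, -roster ≤ pvKey index col x ∧ pvKey index col x < roster) →
      ∀ cur, (∀ x ∈ cur, x ∈ myList) → cur.length = myList.length →
      cols.foldl (fun cur column => radixPassA index roster column cur) cur
      = cols.foldl (fun cur column => radixPassB index roster column myList.length cur) cur := by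
  intro cols
  induction cols with
  | nil => intro _ cur _ _; rfl
  | cons col t ih =>
    intro hbnd cur hmem hlen
    have hbcol : ∀ x ∈ cur, -roster ≤ pvKey index col x ∧ pvKey index col x < roster :=
      fun x hx => hbnd col (by simp) x (hmem x hx)
    obtain ⟨y, hy⟩ : ∃ y, y ∈ myList := by
      cases myList with
      | nil => exact absurd rfl hne
      | cons a l => exact ⟨a, by simp⟩
    have hr : 0 < roster := by
      have := hbnd col (by simp) y hy
      omega
    simp only [List.foldl_cons]
    rw [show myList.length = cur.length from hlen.symm,
        pvPassA_eq index roster col hr cur hbcol,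
        pvPassB_eq index roster col hr cur hbcol]
    rw [show cur.length = myList.length from hlen]
    exact ih (fun c hc x hx => hbnd c (by simp [hc]) x hx)
      _ (fun x hx => hmem _ (pvMMem index roster col cur x hx))
      (by rw [pvMLen index roster col hr cur]; exact hlen)

-- ===== VERDICT (by name: the statement is the Claim_ definition above) =====
lemma pvNumCols (myList : List (List String)) (hne : myList ≠ [])
    (hlen2 : 1 < myList.headI.length) :
    PySem.Str.len ((PySem.List.pyGet? ((PySem.List.pyGet? myList 0).getD []) 1).getD "")
    = (((myList.headI.getD 1 "").toList.length : Nat) : Int) := by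
  cases myList with
  | nil => exact absurd rfl hne
  | cons h t =>
    rw [PySem.List.pyGet?_zero_cons]
    simp only [Option.getD_some, List.headI_cons]
    rw [PySem.List.pyGet?_of_nonneg _ (by norm_num)]
    simp only [List.headI_cons] at hlen2
    rw [List.getD_eq_getElem?_getD, PySem.Str.len_eq]
    norm_num

lemma pvKeyChar (index roster : Int) (x : List String) (c K : Nat) (hcK : c < K)
    (hK : K ≤ ((PySem.List.pyGet? x index).getD "").toList.length) :
    pvKey index ((-1 : Int) - (c : Int)) x
    = ((pvColChar ((PySem.List.pyGet? x index).getD "").toList c).toNat : Int) - 65 := by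
  unfold pvKey
  have hneg : (-1 : Int) - (c : Int) = -(((c + 1 : Nat) : Int)) := by push_cast; ring
  rw [hneg]
  unfold PySem.Str.pyGet? PySem.Chars.pyGet?
  rw [PySem.List.pyGet?_neg_natCast _ (c + 1) (by omega) (by omega)]
  unfold pvColChar
  have heq : ((PySem.List.pyGet? x index).getD "").toList.length - (c + 1)
      = ((PySem.List.pyGet? x index).getD "").toList.length - 1 - c := by omega
  rw [heq]

theorem radix_sort_string_word_spec : Claim_equal_radix_sort_string_word := by
  unfold Claim_equal_radix_sort_string_word Spec_radix_sort_string_word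
  intro myList index roster _ hPre
  obtain ⟨hne, hlen2, hPre3⟩ := hPre
  unfold radix_sort_string_word radix_sort_string_word_alt
  simp only []
  rw [pvNumCols myList hne hlen2, pvRangeNeg ((myList.headI.getD 1 "").toList.length)]
  apply pvOuter myList index roster hne
  · intro col hcol x hx
    simp only [List.mem_map, List.mem_range] at hcol
    obtain ⟨c, hcK, hc⟩ := hcol
    subst hc
    have hbig := hPre3.resolve_left (by omega)
    obtain ⟨_, hKlen, hchar⟩ := hbig x hx
    rw [pvKeyChar index roster x c _ hcK hKlen]
    exact hchar c (List.mem_range.mpr hcK)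
  · exact fun x hx => hx
  · rfl
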